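-- pv_equiv track=rewrite | github.com/totb123/X_device_inspector | X_device_ins/src/inspector1/isectorrepository.py | extract_coordinates
-- ===== SOURCE A (Python) =====
-- def extract_coordinates(dm_position_result):
--     coordinates_list = []
--     start_flag = False
--     for key, value in dm_position_result.items():
--         if key == 'coordinate_1': #!!! Алгоритм ненадежный. Тебе словарь не гарантирует порядок ключей. У тебя в какой-то момент coordinate_1 может оказаться не на первом месте.
--             start_flag = True
--         if start_flag:
--             coordinates_list.append(value) #!!! Я оставлял коммент по этому алгоритму на прошлом ревью. Можем вместе сесть и я тебе расскажу, как пройтись по этому словарю с помощью сорт.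
--     return coordinates_list
-- ===== SOURCE B (Python) =====
-- def extract_coordinates(dm_position_result):
--     keys = list(dm_position_result.keys())
--     if 'coordinate_1' not in keys:
--         return []
--     idx = keys.index('coordinate_1')
--     return list(dm_position_result.values())[idx:]
-- ===== Notes on version B (the rewrite author's own statement) =====
-- stated objective: simpler
-- what changed: Replaced A's stateful flag-accumulator loop with a direct index lookup of 'coordinate_1' in the key list followed by a slice of the value list.
import Mathlib
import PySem

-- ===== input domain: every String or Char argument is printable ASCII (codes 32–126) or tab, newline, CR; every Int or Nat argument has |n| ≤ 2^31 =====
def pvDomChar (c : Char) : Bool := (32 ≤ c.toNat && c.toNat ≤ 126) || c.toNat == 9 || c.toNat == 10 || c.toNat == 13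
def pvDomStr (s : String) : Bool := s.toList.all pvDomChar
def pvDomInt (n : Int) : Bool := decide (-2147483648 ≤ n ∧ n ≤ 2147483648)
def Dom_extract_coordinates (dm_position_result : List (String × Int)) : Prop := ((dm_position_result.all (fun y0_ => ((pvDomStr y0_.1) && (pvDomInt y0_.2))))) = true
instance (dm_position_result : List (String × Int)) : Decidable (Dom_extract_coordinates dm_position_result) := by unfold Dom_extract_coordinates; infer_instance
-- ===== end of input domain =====

-- B replaces A's flag-accumulator loop by an index lookup of 'coordinate_1' and a slice (simpler decomposition).
-- ===== PORT A =====
-- the for-loop over items with state (coordinates_list, start_flag), transliterated as structural recursion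
def extract_coordinates_loopA : List (String × Int) → List Int → Bool → List Int
  | [], acc, _ => acc
  | (key, value) :: rest, acc, start_flag =>
    let start_flag' := if key == "coordinate_1" then true else start_flag
    let acc' := if start_flag' then acc ++ [value] else acc
    extract_coordinates_loopA rest acc' start_flag'

def extract_coordinates (dm_position_result : List (String × Int)) : List Int :=
  extract_coordinates_loopA dm_position_result [] false

-- ===== PORT B =====
-- keys.index + slice-from-a-nonnegative-in-range-index = List.idxOf? + drop (exact here)
def extract_coordinates_alt (dm_position_result : List (String × Int)) : List Int :=
  let keys := dm_position_result.map Prod.fst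
  match keys.idxOf? "coordinate_1" with
  | none => []
  | some idx => (dm_position_result.map Prod.snd).drop idx

-- ===== PRECONDITION & SPEC =====
def Spec_extract_coordinates (dm_position_result : List (String × Int)) (out : List Int) : Prop := out = extract_coordinates_alt dm_position_result
instance (dm_position_result : List (String × Int)) (out : List Int) : Decidable (Spec_extract_coordinates dm_position_result out) := by unfold Spec_extract_coordinates; infer_instance

-- ===== CLAIM (what is proved, stated in full; the proofs are below) =====
def Claim_equal_extract_coordinates : Prop := ∀ (dm_position_result : List (String × Int)), Dom_extract_coordinates dm_position_result → Spec_extract_coordinates dm_position_result (extract_coordinates dm_position_result)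

-- ===== LEMMAS AND PROOFS =====

theorem loopA_true (l : List (String × Int)) (acc : List Int) :
    extract_coordinates_loopA l acc true = acc ++ l.map Prod.snd := by
  induction l generalizing acc with
  | nil => simp [extract_coordinates_loopA]
  | cons kv rest ih =>
    obtain ⟨k, v⟩ := kv
    simp [extract_coordinates_loopA, ih]

theorem loopA_false (l : List (String × Int)) (acc : List Int) :
    extract_coordinates_loopA l acc false = acc ++ extract_coordinates_alt l := by
  induction l generalizing acc with
  | nil => simp [extract_coordinates_loopA, extract_coordinates_alt]
  | cons kv rest ih =>
    obtain ⟨k, v⟩ := kv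
    by_cases hk : k = "coordinate_1"
    · subst hk
      simp [extract_coordinates_loopA, extract_coordinates_alt, loopA_true,
        List.idxOf?, List.findIdx?_cons]
    · have hk' : (k == "coordinate_1") = false := by simp [hk]
      have halt : extract_coordinates_alt ((k, v) :: rest) = extract_coordinates_alt rest := by
        simp only [extract_coordinates_alt, List.map_cons, List.idxOf?_cons, hk']
        cases h : (rest.map Prod.fst).idxOf? "coordinate_1" with
        | none => rfl
        | some i => simp [List.drop_succ_cons]
      simp only [extract_coordinates_loopA, hk', halt]
      simpa using ih acc

-- ===== VERDICT (by name: the statement is the Claim_ definition above) =====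
theorem extract_coordinates_spec : Claim_equal_extract_coordinates := by
  intro l _
  unfold Spec_extract_coordinates extract_coordinates
  simpa using loopA_false l []
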